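-- pv_equiv track=rewrite | github.com/CrimsonCosmos/coltrain-by-theory | coltrain/theory/voice_leading.py | _ensure_ascending
-- ===== SOURCE A (Python) =====
-- from typing import List, Optional, Tuple
--
-- def _ensure_ascending(notes: List[int], low: int, high: int) -> List[int]:
--     """Adjust notes so they are in ascending order within the range."""
--     if not notes:
--         return notes
--
--     result = [notes[0]]
--     for i in range(1, len(notes)):
--         note = notes[i]
--         prev = result[-1]
--         # Move note up until it's above previous note
--         while note <= prev:
--             note += 12
--         # If it's gone above the range, try bringing the previous down
--         if note > high:
--             # Try a lower octave that's still above prev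
--             candidate = note - 12
--             if candidate > prev and candidate >= low:
--                 note = candidate
--         result.append(note)
--
--     return sorted(result)
-- ===== SOURCE B (Python) =====
-- from typing import List
--
-- def _ensure_ascending(notes: List[int], low: int, high: int) -> List[int]:
--     """Adjust notes so they are in ascending order within the range (closed-form octave shift)."""
--     res: List[int] = []
--     for note in notes:
--         if res:
--             prev = res[-1]
--             if note <= prev:
--                 # smallest value in note's octave class strictly above prev
--                 note += 12 * ((prev - note) // 12 + 1)
--             elif note > high and note - 12 > prev and note - 12 >= low:
--                 note -= 12
--         res.append(note)
--     return sorted(res)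
-- ===== Notes on version B (the rewrite author's own statement) =====
-- stated objective: faster
-- what changed: The inner while-loop that climbs octave by octave is replaced by one closed-form modular-arithmetic shift per note ((prev-note)//12+1 octaves), in a single fold over the notes.
import Mathlib
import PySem

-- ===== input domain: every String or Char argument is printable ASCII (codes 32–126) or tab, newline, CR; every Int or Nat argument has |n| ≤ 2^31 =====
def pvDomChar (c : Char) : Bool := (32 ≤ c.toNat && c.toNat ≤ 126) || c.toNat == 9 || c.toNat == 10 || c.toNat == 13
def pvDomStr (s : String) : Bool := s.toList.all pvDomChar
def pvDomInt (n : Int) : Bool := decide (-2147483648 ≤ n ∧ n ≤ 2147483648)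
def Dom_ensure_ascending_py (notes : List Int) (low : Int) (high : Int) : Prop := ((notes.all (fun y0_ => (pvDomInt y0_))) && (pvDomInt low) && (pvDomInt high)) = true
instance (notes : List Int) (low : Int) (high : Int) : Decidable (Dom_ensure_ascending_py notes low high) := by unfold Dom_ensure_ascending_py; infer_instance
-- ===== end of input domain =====

-- B replaces A's octave-by-octave while-loop with one closed-form modular shift per note (objective: faster).

-- ===== PORT A =====
-- while note <= prev: note += 12
def pvBumpUp (prev note : Int) : Int :=
  if note ≤ prev then pvBumpUp prev (note + 12) else note
termination_by (prev + 1 - note).toNat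
decreasing_by omega

-- the body of A's for-loop, acting on the running `result` and the fetched note
def pvBodyA (low high : Int) (result : List Int) (note0 : Int) : List Int :=
  let note := note0
  let prev := PySem.List.pyGetD result (-1) 0
  let note := pvBumpUp prev note
  let note :=
    if note > high then
      let candidate := note - 12
      if candidate > prev ∧ candidate ≥ low then candidate else note
    else note
  result ++ [note]

def ensure_ascending_py (notes : List Int) (low : Int) (high : Int) : List Int :=
  match notes with
  | [] => notes
  | n0 :: _ =>
    let result := (PySem.List.pyRange 1 (notes.length : Int) 1).foldl
      (fun result i => pvBodyA low high result (PySem.List.pyGetD notes i 0)) [n0]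
    PySem.List.sorted result (fun x => x) false

-- ===== PORT B =====
def pvStep (low high prev note : Int) : Int :=
  if note ≤ prev then note + 12 * (PySem.Int.floordiv (prev - note) 12 + 1)
  else if note > high ∧ note - 12 > prev ∧ note - 12 ≥ low then note - 12
  else note

def ensure_ascending_py_alt (notes : List Int) (low : Int) (high : Int) : List Int :=
  PySem.List.sorted
    (notes.foldl (fun res note =>
      res ++ [match res.getLast? with
              | none => note
              | some prev => pvStep low high prev note]) [])
    (fun x => x) false

-- ===== PRECONDITION & SPEC =====
def Spec_ensure_ascending_py (notes : List Int) (low : Int) (high : Int) (out : List Int) : Prop := out = ensure_ascending_py_alt notes low high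
instance (notes : List Int) (low : Int) (high : Int) (out : List Int) : Decidable (Spec_ensure_ascending_py notes low high out) := by unfold Spec_ensure_ascending_py; infer_instance

-- ===== CLAIM (what is proved, stated in full; the proofs are below) =====
def Claim_equal_ensure_ascending_py : Prop := ∀ (notes : List Int) (low : Int) (high : Int), Dom_ensure_ascending_py notes low high → Spec_ensure_ascending_py notes low high (ensure_ascending_py notes low high)

-- ===== LEMMAS AND PROOFS =====
theorem pvBumpUp_closed_aux : ∀ (k : Nat) (prev note : Int), (prev + 1 - note).toNat ≤ k →
    pvBumpUp prev note =
      (if note ≤ prev then note + 12 * (PySem.Int.floordiv (prev - note) 12 + 1) else note) := by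
  intro k
  induction k with
  | zero =>
    intro prev note hk
    have h : ¬ note ≤ prev := by omega
    rw [pvBumpUp, if_neg h, if_neg h]
  | succ k ih =>
    intro prev note hk
    rw [pvBumpUp]
    by_cases h : note ≤ prev
    · rw [if_pos h, ih prev (note + 12) (by omega), if_pos h]
      rw [PySem.Int.floordiv_eq_ediv_of_pos (by norm_num),
          PySem.Int.floordiv_eq_ediv_of_pos (by norm_num)]
      by_cases h2 : note + 12 ≤ prev
      · rw [if_pos h2]; omega
      · rw [if_neg h2]; omega
    · rw [if_neg h, if_neg h]

theorem pvBumpUp_closed (prev note : Int) :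
    pvBumpUp prev note =
      if note ≤ prev then note + 12 * (PySem.Int.floordiv (prev - note) 12 + 1) else note :=
  pvBumpUp_closed_aux (prev + 1 - note).toNat prev note le_rfl

-- the per-element step of A equals pvStep appended
theorem pvBodyA_eq (low high : Int) (result : List Int) (x : Int) :
    pvBodyA low high result x
      = result ++ [pvStep low high (PySem.List.pyGetD result (-1) 0) x] := by
  simp only [pvBodyA]
  generalize PySem.List.pyGetD result (-1) 0 = prev
  simp only [pvStep, pvBumpUp_closed,
    PySem.Int.floordiv_eq_ediv_of_pos (a := prev - x) (b := 12) (by norm_num)]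
  by_cases h : x ≤ prev
  · rw [if_pos h, if_pos h]
    have hle : x + 12 * ((prev - x) / 12 + 1) - 12 ≤ prev := by omega
    split_ifs with h1 h2 <;> first | rfl | omega
  · rw [if_neg h, if_neg h]
    split_ifs <;> simp_all

-- the two fold bodies agree while the accumulator is nonempty
theorem pvFold_eq (low high : Int) (rest : List Int) : ∀ (acc : List Int), acc ≠ [] →
    rest.foldl (pvBodyA low high) acc
    = rest.foldl (fun res note =>
      res ++ [match res.getLast? with
              | none => note
              | some prev => pvStep low high prev note]) acc := by
  induction rest with
  | nil => intro acc _; rfl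
  | cons x xs ih =>
    intro acc hne
    simp only [List.foldl_cons]
    rw [pvBodyA_eq, PySem.List.pyGetD_neg_one acc 0 hne,
        List.getLast?_eq_some_getLast hne]
    exact ih _ (by simp)

theorem ensure_ascending_eq (notes : List Int) (low high : Int) :
    ensure_ascending_py notes low high = ensure_ascending_py_alt notes low high := by
  cases notes with
  | nil => rfl
  | cons n0 rest =>
    show PySem.List.sorted
        ((PySem.List.pyRange 1 ((n0 :: rest).length : Int) 1).foldl
          (fun result i => pvBodyA low high result (PySem.List.pyGetD (n0 :: rest) i 0)) [n0])
        (fun x => x) false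
      = ensure_ascending_py_alt (n0 :: rest) low high
    rw [PySem.List.foldl_pyRange_pyGetD' (n0 :: rest) 0 (pvBodyA low high) [n0]
        (a := 1) (by norm_num)]
    simp only [ensure_ascending_py_alt, List.foldl_cons, Int.toNat_one, List.drop_succ_cons,
      List.drop_zero, List.getLast?_nil, List.nil_append]
    rw [pvFold_eq low high rest [n0] (by simp)]

-- ===== VERDICT (by name: the statement is the Claim_ definition above) =====
theorem ensure_ascending_py_spec : Claim_equal_ensure_ascending_py := by
  intro notes low high _
  unfold Spec_ensure_ascending_py
  exact ensure_ascending_eq notes low high
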